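-- pv_equiv track=rewrite | github.com/Ybema/callio | framework/scripts/document_processor.py | _find_content_after_headers
-- ===== SOURCE A (Python) =====
-- from typing import Dict, Any, Optional, List
--
-- def _find_content_after_headers(markdown: str, keywords: List[str]) -> List[str]:
--     """Find content that appears after headers containing specific keywords."""
--     content = []
--     lines = markdown.split('\n')
--
--     for i, line in enumerate(lines):
--         if line.startswith('#') and any(keyword.lower() in line.lower() for keyword in keywords):
--             # Found relevant header, collect content until next header
--             section_content = []
--             for j in range(i + 1, len(lines)):
--                 if lines[j].startswith('#'):
--                     break
--                 if lines[j].strip():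
--                     section_content.append(lines[j].strip())
--
--             if section_content:
--                 content.append('\n'.join(section_content))
--
--     return content
-- ===== SOURCE B (Python) =====
-- from typing import List
--
-- def _find_content_after_headers(markdown: str, keywords: List[str]) -> List[str]:
--     """Single linear pass with a state machine instead of a nested rescan per header."""
--     content = []
--     active = False
--     section_content = []
--
--     def flush():
--         if section_content:
--             content.append('\n'.join(section_content))
--
--     for line in markdown.split('\n'):
--         if line.startswith('#'):
--             flush()
--             section_content = []
--             active = any(keyword.lower() in line.lower() for keyword in keywords)
--         elif active and line.strip():
--             section_content.append(line.strip())
--     flush()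
--     return content
-- ===== Notes on version B (the rewrite author's own statement) =====
-- stated objective: faster
-- what changed: Replaces the nested rescan (for every matching header, an inner loop re-walks the following lines) with one linear pass keeping an active flag and a section buffer that is flushed at each header and at EOF.
import Mathlib
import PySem

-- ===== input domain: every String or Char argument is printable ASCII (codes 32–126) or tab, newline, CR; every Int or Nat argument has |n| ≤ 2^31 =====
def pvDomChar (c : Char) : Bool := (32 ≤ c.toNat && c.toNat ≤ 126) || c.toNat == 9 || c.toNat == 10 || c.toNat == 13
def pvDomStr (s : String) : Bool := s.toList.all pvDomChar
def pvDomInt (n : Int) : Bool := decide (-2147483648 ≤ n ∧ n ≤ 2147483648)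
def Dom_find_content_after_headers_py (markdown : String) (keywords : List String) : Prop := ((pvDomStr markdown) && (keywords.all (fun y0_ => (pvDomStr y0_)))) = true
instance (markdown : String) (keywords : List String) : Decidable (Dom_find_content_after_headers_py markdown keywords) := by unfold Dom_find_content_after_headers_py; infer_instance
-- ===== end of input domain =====

-- B replaces A's nested per-header rescan with one linear pass over the lines
-- keeping an active flag and a section buffer flushed at headers and at EOF (faster).


-- ===== PORT A =====
-- inner loop of A: 'for j in range(i+1, len(lines)): if startswith # break; if strip: append strip'
-- written as structural recursion over the suffix of lines after the header
def pvCollectA : List String → List String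
  | [] => []
  | l :: rest =>
    if PySem.Str.startswith l "#" then []
    else if PySem.Str.strip l == "" then pvCollectA rest
    else PySem.Str.strip l :: pvCollectA rest

-- outer loop of A over the lines (the inner scan only depends on the suffix after i)
def pvGoA (keywords : List String) : List String → List String → List String
  | [], acc => acc
  | l :: rest, acc =>
    if PySem.Str.startswith l "#"
        && keywords.any (fun k => PySem.Str.isIn (PySem.Str.lower k) (PySem.Str.lower l)) then
      let sc := pvCollectA rest
      pvGoA keywords rest (if sc == [] then acc else acc ++ [PySem.Str.join "\n" sc])
    else
      pvGoA keywords rest acc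

def find_content_after_headers_py (markdown : String) (keywords : List String) : List String :=
  pvGoA keywords ((PySem.Str.split? markdown "\n").getD []) []

-- ===== PORT B =====
-- flush(): append '\n'.join(section_content) to content if the buffer is non-empty
def pvFlushB (acc buf : List String) : List String :=
  if buf == [] then acc else acc ++ [PySem.Str.join "\n" buf]

-- B's single pass: state = (active flag, section buffer, output); flush at headers and at EOF
def pvGoB (keywords : List String) : List String → Bool → List String → List String → List String
  | [], _, buf, acc => pvFlushB acc buf
  | l :: rest, active, buf, acc =>
    if PySem.Str.startswith l "#" then
      pvGoB keywords rest
        (keywords.any (fun k => PySem.Str.isIn (PySem.Str.lower k) (PySem.Str.lower l)))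
        [] (pvFlushB acc buf)
    else
      pvGoB keywords rest active
        (if active && !(PySem.Str.strip l == "") then buf ++ [PySem.Str.strip l] else buf) acc

def find_content_after_headers_py_alt (markdown : String) (keywords : List String) : List String :=
  pvGoB keywords ((PySem.Str.split? markdown "\n").getD []) false [] []

-- ===== PRECONDITION & SPEC =====
def Spec_find_content_after_headers_py (markdown : String) (keywords : List String) (out : List String) : Prop := out = find_content_after_headers_py_alt markdown keywords
instance (markdown : String) (keywords : List String) (out : List String) : Decidable (Spec_find_content_after_headers_py markdown keywords out) := by unfold Spec_find_content_after_headers_py; infer_instance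

-- ===== CLAIM (what is proved, stated in full; the proofs are below) =====
def Claim_equal_find_content_after_headers_py : Prop := ∀ (markdown : String) (keywords : List String), Dom_find_content_after_headers_py markdown keywords → Spec_find_content_after_headers_py markdown keywords (find_content_after_headers_py markdown keywords)

-- ===== LEMMAS AND PROOFS =====

-- the invariant of B's pass: with the flag off and an empty buffer it computes A's loop;
-- with the flag on, the buffer plus A's inner scan of the remaining lines is what gets flushed
theorem pvGoB_invariant (keywords : List String) (lines : List String) :
    (∀ acc, pvGoB keywords lines false [] acc = pvGoA keywords lines acc) ∧
    (∀ buf acc, pvGoB keywords lines true buf acc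
        = pvGoA keywords lines (pvFlushB acc (buf ++ pvCollectA lines))) := by
  induction lines with
  | nil =>
    refine ⟨fun acc => rfl, fun buf acc => ?_⟩
    simp [pvGoB, pvGoA, pvCollectA]
  | cons l rest ih =>
    obtain ⟨ihP, ihQ⟩ := ih
    constructor
    · intro acc
      by_cases hh : PySem.Str.startswith l "#" = true
      · by_cases hm : keywords.any (fun k => PySem.Str.isIn (PySem.Str.lower k) (PySem.Str.lower l)) = true
        · simp only [pvGoB, pvGoA, hh, hm, if_true, Bool.and_self]
          rw [ihQ [] (pvFlushB acc [])]
          simp [pvFlushB]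
        · simp only [pvGoB, pvGoA, hh, hm, Bool.true_and, if_true]
          rw [ihP (pvFlushB acc [])]
          simp [pvFlushB]
      · simp only [pvGoB, pvGoA, hh, Bool.false_and]
        exact ihP acc
    · intro buf acc
      by_cases hh : PySem.Str.startswith l "#" = true
      · by_cases hm : keywords.any (fun k => PySem.Str.isIn (PySem.Str.lower k) (PySem.Str.lower l)) = true
        · simp only [pvGoB, pvGoA, pvCollectA, hh, hm, if_true, Bool.true_and]
          rw [ihQ [] (pvFlushB acc buf)]
          simp [pvFlushB]
        · simp only [pvGoB, pvGoA, pvCollectA, hh, hm, if_true, Bool.true_and]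
          rw [ihP (pvFlushB acc buf)]
          simp
      · by_cases hs : PySem.Str.strip l == ""
        · simp only [pvGoB, pvGoA, pvCollectA, hh, hs, Bool.false_and, if_true,
            Bool.not_true, Bool.and_false]
          exact ihQ buf acc
        · simp only [pvGoB, pvGoA, pvCollectA, hh, hs, Bool.false_and, if_true,
            Bool.not_false, Bool.and_true]
          rw [ihQ (buf ++ [PySem.Str.strip l]) acc]
          simp

-- ===== VERDICT (by name: the statement is the Claim_ definition above) =====
theorem find_content_after_headers_py_spec : Claim_equal_find_content_after_headers_py := by
  intro markdown keywords _
  unfold Spec_find_content_after_headers_py find_content_after_headers_py find_content_after_headers_py_alt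
  exact ((pvGoB_invariant keywords ((PySem.Str.split? markdown "\n").getD [])).1 []).symm
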